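-- pv_equiv track=rewrite | github.com/rahulsamant37/Daily-Task | codeforces/cp-templates/python/string-algorithms/ZAlgirthm.py | string_factorization_z
-- ===== SOURCE A (Python) =====
-- def z_function(s):
--     """
--     Z-algorithm implementation
--     z[i] = length of longest substring starting from s[i] which is also prefix of s
--     Time complexity: O(n)
--
--     Args:
--         s: input string
--
--     Returns:
--         z array where z[i] is length of longest common prefix of s and s[i:]
--     """
--     n = len(s)
--     z = [0] * n
--     z[0] = n
--
--     l, r = 0, 0
--     for i in range(1, n):
--         if i <= r:
--             z[i] = min(r - i + 1, z[i - l])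
--
--         while i + z[i] < n and s[z[i]] == s[i + z[i]]:
--             z[i] += 1
--
--         if i + z[i] - 1 > r:
--             l, r = i, i + z[i] - 1
--
--     return z
--
-- def string_factorization_z(s):
--     """
--     Factorize string into Lyndon words using Z-algorithm
--
--     Returns:
--         list of factors
--     """
--     n = len(s)
--     factors = []
--     i = 0
--
--     while i < n:
--         z = z_function(s[i:])
--
--         # Find the longest prefix that is also a suffix
--         j = 1
--         while j < len(z) and i + j < n:
--             if z[j] > 0 and j + z[j] == len(z):
--                 break
--             j += 1
--
--         factors.append(s[i:i + j])
--         i += j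
--
--     return factors
-- ===== SOURCE B (Python) =====
-- def string_factorization_z(s):
--     """
--     Factorize string into smallest-period prefixes.
--     For each remaining suffix t, the cut length is the smallest p >= 1
--     such that t[p:] is a prefix of t (i.e. the smallest period of t),
--     found by a direct startswith scan -- no Z-array.
--     """
--     n = len(s)
--     factors = []
--     i = 0
--     while i < n:
--         t = s[i:]
--         p = 1
--         while p < len(t) and not t.startswith(t[p:]):
--             p += 1
--         factors.append(t[:p])
--         i += p
--     return factors
-- ===== Notes on version B (the rewrite author's own statement) =====
-- stated objective: simpler
-- what changed: For each remaining suffix A builds a full Z-array and scans it for the first j with z[j]>0 and j+z[j]==len; B drops the Z-array entirely and finds the same cut length as the smallest p>=1 with t[p:] a prefix of t (the smallest period of t) via a direct startswith scan.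
import Mathlib
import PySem

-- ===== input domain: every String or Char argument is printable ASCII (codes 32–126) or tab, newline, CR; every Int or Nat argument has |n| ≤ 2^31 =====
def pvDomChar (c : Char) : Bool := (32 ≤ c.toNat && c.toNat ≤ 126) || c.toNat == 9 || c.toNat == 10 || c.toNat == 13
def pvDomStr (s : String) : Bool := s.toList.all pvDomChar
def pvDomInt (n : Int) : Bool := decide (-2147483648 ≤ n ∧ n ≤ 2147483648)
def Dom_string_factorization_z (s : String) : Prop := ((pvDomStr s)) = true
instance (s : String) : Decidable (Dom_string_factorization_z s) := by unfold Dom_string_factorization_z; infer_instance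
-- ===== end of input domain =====

-- B replaces A's per-suffix Z-array-and-scan by a direct smallest-period scan (simpler, no Z-array).

-- ===== PORT A =====
-- the inner `while i + z[i] < n and s[z[i]] == s[i + z[i]]: z[i] += 1` of z_function
def zExtend (t : List Char) (i zi : Nat) : Nat :=
  if h : i + zi < t.length ∧ t.getD zi ' ' = t.getD (i + zi) ' ' then
    zExtend t i (zi + 1)
  else zi
termination_by t.length - (i + zi)
decreasing_by omega

-- one iteration of z_function's `for i in range(1, n)` body; state = (z, l, r)
def zStep (t : List Char) (st : Array Nat × Nat × Nat) (i : Nat) : Array Nat × Nat × Nat :=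
  let z0 := if i ≤ st.2.2 then min (st.2.2 - i + 1) (st.1.getD (i - st.2.1) 0) else 0
  let zi := zExtend t i z0
  let z' := st.1.setIfInBounds i zi
  if st.2.2 < i + zi - 1 then (z', i, i + zi - 1) else (z', st.2.1, st.2.2)

def zIter (t : List Char) (st : Array Nat × Nat × Nat) (i : Nat) : Array Nat × Nat × Nat :=
  if i < t.length then zIter t (zStep t st i) (i + 1) else st
termination_by t.length - i
decreasing_by omega

-- z_function(s) on the character list of s
def zFun (t : List Char) : Array Nat :=
  (zIter t ((Array.replicate t.length 0).setIfInBounds 0 t.length, 0, 0) 1).1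

-- the `j = 1; while j < len(z) and i + j < n: if z[j] > 0 and j + z[j] == len(z): break; j += 1` scan
def zScan (z : Array Nat) (n i j : Nat) : Nat :=
  if j < z.size ∧ i + j < n then
    (if 0 < z.getD j 0 ∧ j + z.getD j 0 = z.size then j else zScan z n i (j + 1))
  else j
termination_by z.size - j
decreasing_by omega

theorem zScan_ge (z : Array Nat) (n i : Nat) :
    ∀ m j, z.size - j ≤ m → j ≤ zScan z n i j := by
  intro m
  induction m with
  | zero =>
      intro j hj
      rw [zScan]
      split
      · split
        · exact Nat.le_refl j
        · omega
      · exact Nat.le_refl j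
  | succ m ih =>
      intro j hj
      rw [zScan]
      split
      · split
        · exact Nat.le_refl j
        · exact Nat.le_trans (Nat.le_succ j) (ih (j + 1) (by omega))
      · exact Nat.le_refl j

-- the outer `while i < n` loop of string_factorization_z
def factLoop (sl : List Char) (i : Nat) : List String :=
  if h : i < sl.length then
    let z := zFun (sl.drop i)
    let j := zScan z sl.length i 1
    String.mk ((sl.drop i).take j) :: factLoop sl (i + j)
  else []
termination_by sl.length - i
decreasing_by
  have := zScan_ge (zFun (sl.drop i)) sl.length i ((zFun (sl.drop i)).size - 1) 1 (by omega)
  omega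

def string_factorization_z (s : String) : List String := factLoop s.toList 0

-- ===== PORT B =====
-- `p = 1; while p < len(t) and not t.startswith(t[p:]): p += 1`
def periodLoop (t : List Char) (p : Nat) : Nat :=
  if p < t.length ∧ ¬ (t.drop p).isPrefixOf t then periodLoop t (p + 1) else p
termination_by t.length - p
decreasing_by omega

theorem periodLoop_ge (t : List Char) :
    ∀ m p, t.length - p ≤ m → p ≤ periodLoop t p := by
  intro m
  induction m with
  | zero =>
      intro p hp
      rw [periodLoop]
      split
      · omega
      · exact Nat.le_refl p
  | succ m ih =>
      intro p hp
      rw [periodLoop]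
      split
      · exact Nat.le_trans (Nat.le_succ p) (ih (p + 1) (by omega))
      · exact Nat.le_refl p

-- the outer `while i < n` loop of B
def altLoop (sl : List Char) (i : Nat) : List String :=
  if h : i < sl.length then
    let p := periodLoop (sl.drop i) 1
    String.mk ((sl.drop i).take p) :: altLoop sl (i + p)
  else []
termination_by sl.length - i
decreasing_by
  have := periodLoop_ge (sl.drop i) ((sl.drop i).length - 1) 1 (by omega)
  omega

def string_factorization_z_alt (s : String) : List String := altLoop s.toList 0

-- ===== PRECONDITION & SPEC =====
def Spec_string_factorization_z (s : String) (out : List String) : Prop := out = string_factorization_z_alt s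
instance (s : String) (out : List String) : Decidable (Spec_string_factorization_z s out) := by unfold Spec_string_factorization_z; infer_instance

-- ===== CLAIM (what is proved, stated in full; the proofs are below) =====
def Claim_equal_string_factorization_z : Prop := ∀ (s : String), Dom_string_factorization_z s → Spec_string_factorization_z s (string_factorization_z s)

-- ===== LEMMAS AND PROOFS =====

/-- length of the longest common prefix of two lists -/
def lcp : List Char → List Char → Nat
  | a :: as, b :: bs => if a = b then lcp as bs + 1 else 0
  | _, _ => 0

theorem lcp_le_right : ∀ (a b : List Char), lcp a b ≤ b.length := by
  intro a
  induction a with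
  | nil => intro b; cases b <;> simp [lcp]
  | cons x xs ih =>
      intro b
      cases b with
      | nil => simp [lcp]
      | cons y ys =>
          simp only [lcp]
          split
          · simpa using ih ys
          · simp

theorem getD_eq_of_lt_lcp (d : Char) :
    ∀ (a b : List Char) (k : Nat), k < lcp a b → a.getD k d = b.getD k d := by
  intro a
  induction a with
  | nil => intro b k hk; cases b <;> simp [lcp] at hk
  | cons x xs ih =>
      intro b k hk
      cases b with
      | nil => simp [lcp] at hk
      | cons y ys =>
          simp only [lcp] at hk
          split at hk
          · cases k with
            | zero => simpa using ‹x = y›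
            | succ k => simpa using ih ys k (by omega)
          · omega

theorem getD_ne_lcp (d : Char) :
    ∀ (a b : List Char), lcp a b < a.length → lcp a b < b.length →
      a.getD (lcp a b) d ≠ b.getD (lcp a b) d := by
  intro a
  induction a with
  | nil => intro b h1 _; simp at h1
  | cons x xs ih =>
      intro b h1 h2
      cases b with
      | nil => simp at h2
      | cons y ys =>
          simp only [lcp] at h1 h2 ⊢
          by_cases hxy : x = y
          · rw [if_pos hxy] at h1 h2 ⊢
            simp only [List.length_cons] at h1 h2
            simpa using ih ys (by omega) (by omega)
          · rw [if_neg hxy] at h1 h2 ⊢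
            simpa using hxy

theorem le_lcp (d : Char) :
    ∀ (a b : List Char) (m : Nat), m ≤ a.length → m ≤ b.length →
      (∀ k, k < m → a.getD k d = b.getD k d) → m ≤ lcp a b := by
  intro a
  induction a with
  | nil =>
      intro b m h1 _ _
      have hm : m = 0 := by simpa using h1
      subst hm
      exact Nat.zero_le _
  | cons x xs ih =>
      intro b m h1 h2 hk
      cases b with
      | nil => simp at h2; omega
      | cons y ys =>
          cases m with
          | zero => exact Nat.zero_le _
          | succ m =>
              have hxy : x = y := by simpa using hk 0 (by omega)
              simp only [lcp, if_pos hxy]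
              have : m ≤ lcp xs ys := by
                refine ih ys m (by simpa using h1) (by simpa using h2) ?_
                intro k hkm
                simpa using hk (k + 1) (by omega)
              omega

theorem lcp_eq_right_iff :
    ∀ (a b : List Char), lcp a b = b.length ↔ b <+: a := by
  intro a
  induction a with
  | nil =>
      intro b
      cases b with
      | nil => simp [lcp]
      | cons y ys => simp [lcp]
  | cons x xs ih =>
      intro b
      cases b with
      | nil => simp [lcp]
      | cons y ys =>
          simp only [lcp]
          by_cases hxy : x = y
          · subst hxy
            rw [if_pos rfl]
            simpa [List.cons_prefix_cons] using ih ys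
          · rw [if_neg hxy]
            simp only [List.length_cons, List.cons_prefix_cons]
            constructor
            · intro h; omega
            · rintro ⟨h, -⟩; exact absurd h.symm hxy

theorem getD_drop (l : List Char) (i k : Nat) (d : Char) :
    (l.drop i).getD k d = l.getD (i + k) d := by
  simp [List.getD_eq_getElem?_getD, List.getElem?_drop]

/-- specified value of the Z-array entry -/
def zspec (t : List Char) (k : Nat) : Nat :=
  if k = 0 then t.length else lcp t (t.drop k)

theorem zExtend_eq (t : List Char) (i : Nat) (hi : 1 ≤ i) :
    ∀ fuel zi, lcp t (t.drop i) - zi ≤ fuel → zi ≤ lcp t (t.drop i) →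
      zExtend t i zi = lcp t (t.drop i) := by
  intro fuel
  induction fuel with
  | zero =>
      intro zi hf hz
      have hzi : zi = lcp t (t.drop i) := by omega
      subst hzi
      rw [zExtend]
      rw [dif_neg]
      push_neg
      intro hlt
      have hL : lcp t (t.drop i) < (t.drop i).length := by
        have := List.length_drop (l := t) (i := i); omega
      have h1 : lcp t (t.drop i) < t.length := by
        have := lcp_le_right t (t.drop i)
        simp only [List.length_drop] at hL ⊢
        omega
      have := getD_ne_lcp ' ' t (t.drop i) h1 hL
      rw [getD_drop] at this
      exact this
  | succ fuel ih =>
      intro zi hf hz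
      rcases Nat.lt_or_ge zi (lcp t (t.drop i)) with hlt | hge
      · rw [zExtend]
        rw [dif_pos]
        · exact ih (zi + 1) (by omega) (by omega)
        · constructor
          · have := lcp_le_right t (t.drop i)
            simp only [List.length_drop] at this
            omega
          · have := getD_eq_of_lt_lcp ' ' t (t.drop i) zi hlt
            rwa [getD_drop] at this
      · have hzi : zi = lcp t (t.drop i) := by omega
        exact (by
          subst hzi
          rw [zExtend]
          rw [dif_neg]
          push_neg
          intro hlt2
          have hL : lcp t (t.drop i) < (t.drop i).length := by
            have := List.length_drop (l := t) (i := i); omega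
          have h1 : lcp t (t.drop i) < t.length := by
            simp only [List.length_drop] at hL
            omega
          have := getD_ne_lcp ' ' t (t.drop i) h1 hL
          rw [getD_drop] at this
          exact this)

/-- invariant of z_function's main loop -/
def ZInv (t : List Char) (st : Array Nat × Nat × Nat) (i : Nat) : Prop :=
  st.1.size = t.length ∧
  (∀ k, k < i → st.1.getD k 0 = zspec t k) ∧
  st.2.1 < i ∧
  st.2.2 + 1 ≤ st.2.1 + zspec t st.2.1 ∧
  (st.2.1 = 0 → st.2.2 = 0)

theorem lcp_shift (t : List Char) (lo i : Nat) (hlo : lo ≤ i) :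
    min (lcp t (t.drop (i - lo))) (lo + lcp t (t.drop lo) - i) ≤ lcp t (t.drop i) := by
  set m := min (lcp t (t.drop (i - lo))) (lo + lcp t (t.drop lo) - i) with hm
  have hzl := lcp_le_right t (t.drop lo)
  simp only [List.length_drop] at hzl
  have h1 : m ≤ t.length := le_trans (le_trans (min_le_left _ _) (lcp_le_right t _)) (by simp)
  refine le_lcp ' ' t (t.drop i) m h1 ?_ ?_
  · simp only [List.length_drop]
    have hm2 : m ≤ lo + lcp t (t.drop lo) - i := min_le_right _ _
    omega
  · intro k hk
    have hk1 : k < lcp t (t.drop (i - lo)) := lt_of_lt_of_le hk (min_le_left _ _)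
    have hk2 : (i - lo) + k < lcp t (t.drop lo) := by
      have := lt_of_lt_of_le hk (min_le_right _ _)
      omega
    have e1 : t.getD k ' ' = t.getD (i - lo + k) ' ' := by
      have := getD_eq_of_lt_lcp ' ' t (t.drop (i - lo)) k hk1
      rwa [getD_drop] at this
    have e2 : t.getD (i - lo + k) ' ' = t.getD (lo + (i - lo + k)) ' ' := by
      have := getD_eq_of_lt_lcp ' ' t (t.drop lo) (i - lo + k) hk2
      rwa [getD_drop] at this
    rw [getD_drop]
    rw [e1, e2]
    congr 1
    omega

theorem getD_setIfInBounds (a : Array Nat) (i k v : Nat) :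
    (a.setIfInBounds i v).getD k 0 = if i = k ∧ i < a.size then v else a.getD k 0 := by
  rw [Array.getD_eq_getD_getElem?, Array.getD_eq_getD_getElem?, Array.getElem?_setIfInBounds]
  by_cases h1 : i = k
  · subst h1
    by_cases h2 : i < a.size
    · simp [h2]
    · have hk : a[i]? = none := by
        rw [Array.getElem?_eq_none_iff]; omega
      simp [h2]
  · rw [if_neg h1, if_neg (fun h => h1 h.1)]

theorem zStep_inv (t : List Char) (st : Array Nat × Nat × Nat) (i : Nat)
    (hinv : ZInv t st i) (hi : i < t.length) :
    ZInv t (zStep t st i) (i + 1) := by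
  obtain ⟨hsz, hk, hlo, hhi, hz0⟩ := hinv
  have hi1 : 1 ≤ i := by omega
  set L := lcp t (t.drop i) with hL
  have hLlen : L ≤ t.length - i := by
    have := lcp_le_right t (t.drop i); simpa using this
  -- the starting value is ≤ L
  have hstart : (if i ≤ st.2.2 then min (st.2.2 - i + 1) (st.1.getD (i - st.2.1) 0) else 0) ≤ L := by
    split
    · rename_i hir
      have hlo1 : 1 ≤ st.2.1 := by
        by_contra h
        have : st.2.1 = 0 := by omega
        have := hz0 this
        omega
      have hkk : st.1.getD (i - st.2.1) 0 = zspec t (i - st.2.1) := hk _ (by omega)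
      have hzsp : zspec t (i - st.2.1) = lcp t (t.drop (i - st.2.1)) := by
        simp [zspec]; omega
      have hzlo : zspec t st.2.1 = lcp t (t.drop st.2.1) := by
        simp [zspec]; omega
      have hshift := lcp_shift t st.2.1 i (by omega)
      rw [hkk, hzsp]
      rw [hzlo] at hhi
      calc min (st.2.2 - i + 1) (lcp t (t.drop (i - st.2.1)))
          ≤ min (lcp t (t.drop (i - st.2.1))) (st.2.1 + lcp t (t.drop st.2.1) - i) := by
            rw [min_comm]
            exact min_le_min (le_refl _) (by omega)
        _ ≤ L := hshift
    · exact Nat.zero_le _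
  have hext : zExtend t i (if i ≤ st.2.2 then min (st.2.2 - i + 1) (st.1.getD (i - st.2.1) 0) else 0) = L :=
    zExtend_eq t i hi1 _ _ (le_refl _) hstart
  have hzi : zspec t i = L := by
    unfold zspec
    rw [if_neg (show ¬ i = 0 by omega)]
  unfold zStep
  simp only [hext]
  split
  all_goals unfold ZInv
  all_goals dsimp only
  · refine ⟨by simpa using hsz, ?_, by omega, ?_, by omega⟩
    · intro k hk'
      rw [getD_setIfInBounds]
      split
      · rename_i h; rw [← h.1, hzi]
      · rename_i h
        have : k < i := by
          rcases Nat.lt_or_ge k i with h1 | h1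
          · exact h1
          · exfalso; exact h ⟨by omega, by omega⟩
        exact hk k this
    · rw [hzi]; omega
  · refine ⟨by simpa using hsz, ?_, by omega, hhi, hz0⟩
    intro k hk'
    rw [getD_setIfInBounds]
    split
    · rename_i h; rw [← h.1, hzi]
    · rename_i h
      have : k < i := by
        rcases Nat.lt_or_ge k i with h1 | h1
        · exact h1
        · exfalso; exact h ⟨by omega, by omega⟩
      exact hk k this

theorem zIter_spec (t : List Char) :
    ∀ fuel i st, t.length - i ≤ fuel → ZInv t st i →
      (zIter t st i).1.size = t.length ∧
      ∀ k, k < t.length → (zIter t st i).1.getD k 0 = zspec t k := by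
  intro fuel
  induction fuel with
  | zero =>
      intro i st hf hinv
      rw [zIter]
      rw [if_neg (by omega)]
      exact ⟨hinv.1, fun k hk => hinv.2.1 k (by omega)⟩
  | succ fuel ih =>
      intro i st hf hinv
      rw [zIter]
      split
      · exact ih (i + 1) _ (by omega) (zStep_inv t st i hinv (by omega))
      · rename_i h
        exact ⟨hinv.1, fun k hk => hinv.2.1 k (by omega)⟩

theorem zFun_spec (t : List Char) (ht : t ≠ []) :
    (zFun t).size = t.length ∧ ∀ k, k < t.length → (zFun t).getD k 0 = zspec t k := by
  have hn : 1 ≤ t.length := by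
    cases t with
    | nil => exact absurd rfl ht
    | cons x xs => simp
  refine zIter_spec t t.length 1 _ (by omega) ?_
  unfold ZInv
  dsimp only
  refine ⟨by simp, ?_, by omega, ?_, by simp⟩
  · intro k hk
    have hk0 : k = 0 := by omega
    subst hk0
    rw [getD_setIfInBounds]
    rw [if_pos ⟨rfl, by simpa using hn⟩]
    simp [zspec]
  · simp [zspec]
    omega

theorem scan_eq (sl : List Char) (i : Nat) (hi : i < sl.length) :
    ∀ fuel j, 1 ≤ j → sl.length - i - j ≤ fuel →
      zScan (zFun (sl.drop i)) sl.length i j = periodLoop (sl.drop i) j := by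
  have ht : sl.drop i ≠ [] := by
    intro h
    have := List.length_drop (l := sl) (i := i)
    rw [h] at this
    simp at this
    omega
  obtain ⟨hsz, hval⟩ := zFun_spec (sl.drop i) ht
  have hlen : (sl.drop i).length = sl.length - i := by simp
  intro fuel
  induction fuel with
  | zero =>
      intro j hj hf
      rw [zScan, periodLoop]
      rw [if_neg (by omega), if_neg (by omega)]
  | succ fuel ih =>
      intro j hj hf
      rw [zScan, periodLoop]
      by_cases hjlt : j < (sl.drop i).length
      · rw [if_pos (by omega)]
        have hzj : (zFun (sl.drop i)).getD j 0 = lcp (sl.drop i) ((sl.drop i).drop j) := by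
          rw [hval j (by omega)]
          simp [zspec]
          omega
        have hpref : ((sl.drop i).drop j).isPrefixOf (sl.drop i) = true ↔
            lcp (sl.drop i) ((sl.drop i).drop j) = (sl.drop i).length - j := by
          rw [List.isPrefixOf_iff_prefix]
          rw [← lcp_eq_right_iff]
          simp only [List.length_drop]
        by_cases hbrk : 0 < (zFun (sl.drop i)).getD j 0 ∧ j + (zFun (sl.drop i)).getD j 0 = (zFun (sl.drop i)).size
        · rw [if_pos hbrk]
          rw [hzj, hsz] at hbrk
          have hp : ((sl.drop i).drop j).isPrefixOf (sl.drop i) = true := by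
            rw [hpref]; omega
          have hcond : ¬ (j < (List.drop i sl).length ∧ ¬ (List.drop j (List.drop i sl)).isPrefixOf (List.drop i sl) = true) :=
            fun hc => hc.2 hp
          rw [if_neg hcond]
        · rw [if_neg hbrk]
          rw [if_pos]
          · exact ih (j + 1) (by omega) (by omega)
          · refine ⟨hjlt, ?_⟩
            simp only [Bool.not_eq_true]
            rw [Bool.eq_false_iff]
            intro hp
            rw [hpref] at hp
            rw [hzj, hsz] at hbrk
            push_neg at hbrk
            rcases Nat.eq_zero_or_pos (lcp (sl.drop i) ((sl.drop i).drop j)) with h0 | h0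
            · omega
            · have := hbrk h0
              omega
      · rw [if_neg (by omega), if_neg (by omega)]

theorem loops_eq (sl : List Char) :
    ∀ fuel i, sl.length - i ≤ fuel → factLoop sl i = altLoop sl i := by
  intro fuel
  induction fuel with
  | zero =>
      intro i hf
      rw [factLoop, altLoop]
      rw [dif_neg (by omega), dif_neg (by omega)]
  | succ fuel ih =>
      intro i hf
      rw [factLoop, altLoop]
      by_cases hi : i < sl.length
      · rw [dif_pos hi, dif_pos hi]
        have hscan := scan_eq sl i hi (sl.length - i - 1) 1 (le_refl _) (by omega)
        simp only [hscan]
        congr 1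
        have hp1 : 1 ≤ periodLoop (sl.drop i) 1 :=
          periodLoop_ge (sl.drop i) ((sl.drop i).length - 1) 1 (by omega)
        exact ih (i + periodLoop (sl.drop i) 1) (by omega)
      · rw [dif_neg hi, dif_neg hi]

-- ===== VERDICT (by name: the statement is the Claim_ definition above) =====
theorem string_factorization_z_spec : Claim_equal_string_factorization_z := by
  intro s _
  unfold Spec_string_factorization_z string_factorization_z string_factorization_z_alt
  exact loops_eq s.toList s.toList.length 0 (by omega)
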